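-- pv_equiv track=rewrite | github.com/Aaronkk977/Go-Rank-Prediction | Q5_mlp.py | split_games
-- ===== SOURCE A (Python) =====
-- from typing import List, Tuple, Optional, Dict
--
-- def split_games(lines: List[str]) -> List[List[str]]:
--     games: List[List[str]] = []
--     cur: List[str] = []
--     for ln in lines:
--         if ln.strip().startswith("Game "):
--             if cur:
--                 games.append(cur)
--                 cur = []
--         else:
--             cur.append(ln)
--     if cur:
--         games.append(cur)
--     return games
-- ===== SOURCE B (Python) =====
-- from typing import List
--
--
-- def split_games(lines: List[str]) -> List[List[str]]:
--     games: List[List[str]] = []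
--     n = len(lines)
--     i = 0
--     while i < n:
--         j = i
--         while j < n and not lines[j].strip().startswith("Game "):
--             j += 1
--         if j > i:
--             games.append(lines[i:j])
--         i = j + 1
--     return games
-- ===== Notes on version B (the rewrite author's own statement) =====
-- stated objective: alternative
-- what changed: Replaced A's accumulator/flush fold (growing a 'cur' list element by element) with a two-pointer index scan that finds each marker-free run [i:j) and emits it as a single slice, never maintaining a partial-group accumulator.
import Mathlib
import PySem

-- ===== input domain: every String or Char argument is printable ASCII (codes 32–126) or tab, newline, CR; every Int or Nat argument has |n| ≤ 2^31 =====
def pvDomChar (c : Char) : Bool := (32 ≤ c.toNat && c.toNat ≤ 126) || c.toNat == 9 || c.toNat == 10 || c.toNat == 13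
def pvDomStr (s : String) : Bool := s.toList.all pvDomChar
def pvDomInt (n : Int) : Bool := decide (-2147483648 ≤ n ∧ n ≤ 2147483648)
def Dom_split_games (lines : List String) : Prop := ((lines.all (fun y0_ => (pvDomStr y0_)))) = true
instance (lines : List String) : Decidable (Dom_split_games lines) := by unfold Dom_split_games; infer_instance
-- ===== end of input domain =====

-- B replaces A's accumulator/flush loop by a two-pointer index scan emitting each
-- marker-free run as one slice (alternative decomposition, same asymptotic cost).

-- ===== PORT A =====
def pvPred (ln : String) : Bool := PySem.Str.startswith (PySem.Str.strip ln) "Game "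

def pvStepA (st : List (List String) × List String) (ln : String) :
    List (List String) × List String :=
  if pvPred ln then
    (if st.2.isEmpty then st else (st.1 ++ [st.2], []))
  else
    (st.1, st.2 ++ [ln])

def split_games (lines : List String) : List (List String) :=
  let st := lines.foldl pvStepA ([], [])
  if st.2.isEmpty then st.1 else st.1 ++ [st.2]

-- ===== PORT B =====
-- inner while loop of Source B: advance j while j < n and lines[j] is not a marker
def pvFindJ (lines : List String) (j : Nat) : Nat :=
  if h : j < lines.length then
    if pvPred lines[j] then j else pvFindJ lines (j + 1)
  else j
termination_by lines.length - j

theorem pvFindJ_ge (lines : List String) (j : Nat) : j ≤ pvFindJ lines j := by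
  fun_induction pvFindJ lines j <;> omega

-- outer while loop of Source B
def pvLoopB (lines : List String) (i : Nat) (games : List (List String)) :
    List (List String) :=
  if h : i < lines.length then
    let j := pvFindJ lines i
    pvLoopB lines (j + 1)
      (if i < j then games ++ [PySem.List.slice lines (some (i : Int)) (some (j : Int))]
       else games)
  else games
termination_by lines.length - i
decreasing_by
  have := pvFindJ_ge lines i
  omega

def split_games_alt (lines : List String) : List (List String) :=
  pvLoopB lines 0 []

-- ===== PRECONDITION & SPEC =====
def Spec_split_games (lines : List String) (out : List (List String)) : Prop := out = split_games_alt lines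
instance (lines : List String) (out : List (List String)) : Decidable (Spec_split_games lines out) := by unfold Spec_split_games; infer_instance

-- ===== CLAIM (what is proved, stated in full; the proofs are below) =====
def Claim_equal_split_games : Prop := ∀ (lines : List String), Dom_split_games lines → Spec_split_games lines (split_games lines)

-- ===== LEMMAS AND PROOFS =====

-- reference splitter: recursion peeling the first marker-free run
def pvR (l : List String) : List (List String) :=
  match h : l.dropWhile (fun ln => !pvPred ln) with
  | [] => if l.isEmpty then [] else [l]
  | _ :: tl =>
      (if (l.takeWhile (fun ln => !pvPred ln)).isEmpty then []
       else [l.takeWhile (fun ln => !pvPred ln)]) ++ pvR tl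
termination_by l.length
decreasing_by
  have hs := (List.dropWhile_sublist (l := l) (p := fun ln => !pvPred ln)).length_le
  rw [h] at hs
  simp at hs
  omega

theorem pvR_nil : pvR [] = [] := by
  rw [pvR]
  simp

theorem pv_tw_dw (p : String → Bool) (c : List String) (hc : ∀ x ∈ c, p x = true)
    (m : String) (hm : p m = false) (rest : List String) :
    (c ++ m :: rest).takeWhile p = c ∧ (c ++ m :: rest).dropWhile p = m :: rest := by
  induction c with
  | nil => simp [List.takeWhile, hm]
  | cons a c ih =>
      have ha := hc a (by simp)
      have := ih (fun x hx => hc x (by simp [hx]))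
      simp [List.takeWhile, ha, this.1, this.2]

theorem pvR_all (c : List String) (hc : ∀ x ∈ c, pvPred x = false) :
    pvR c = if c.isEmpty then [] else [c] := by
  have hdw : c.dropWhile (fun ln => !pvPred ln) = [] := by
    rw [List.dropWhile_eq_nil_iff]
    intro x hx; simp [hc x hx]
  rw [pvR]
  split
  · rfl
  · rename_i heq; rw [hdw] at heq; exact absurd heq (by simp)

theorem pvR_split (c : List String) (hc : ∀ x ∈ c, pvPred x = false)
    (m : String) (hm : pvPred m = true) (rest : List String) :
    pvR (c ++ m :: rest) = (if c.isEmpty then [] else [c]) ++ pvR rest := by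
  have h := pv_tw_dw (fun ln => !pvPred ln) c (by intro x hx; simp [hc x hx]) m (by simp [hm]) rest
  rw [pvR]
  split
  · rename_i heq; rw [h.2] at heq; exact absurd heq (by simp)
  · rename_i x tl heq
    rw [h.2] at heq
    cases heq
    rw [h.1]

theorem pvA_loop (lines : List String) : ∀ (g : List (List String)) (c : List String),
    (∀ x ∈ c, pvPred x = false) →
    (let st := lines.foldl pvStepA (g, c);
     if st.2.isEmpty then st.1 else st.1 ++ [st.2]) = g ++ pvR (c ++ lines) := by
  induction lines with
  | nil =>
      intro g c hc
      simp only [List.foldl_nil, List.append_nil]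
      rw [pvR_all c hc]
      cases c <;> simp
  | cons ln rest ih =>
      intro g c hc
      by_cases hp : pvPred ln
      · have hstep : pvStepA (g, c) ln = (g ++ (if c.isEmpty then [] else [c]), ([] : List String)) := by
          simp only [pvStepA, hp, if_true]
          cases c <;> simp
        simp only [List.foldl_cons, hstep]
        have := ih (g ++ (if c.isEmpty then [] else [c])) [] (by simp)
        simp only [List.nil_append] at this
        rw [this, pvR_split c hc ln hp rest]
        simp [List.append_assoc]
      · have hstep : pvStepA (g, c) ln = (g, c ++ [ln]) := by
          simp [pvStepA, hp]
        simp only [List.foldl_cons, hstep]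
        have := ih g (c ++ [ln]) (by
          intro x hx
          rcases List.mem_append.mp hx with h1 | h1
          · exact hc x h1
          · simp at h1; subst h1; simpa using hp)
        rw [this, List.append_assoc]
        simp

theorem pvFindJ_spec (lines : List String) (i : Nat) :
    pvFindJ lines i = i + ((lines.drop i).takeWhile (fun ln => !pvPred ln)).length := by
  fun_induction pvFindJ lines i with
  | case1 j h hp =>
      rw [List.drop_eq_getElem_cons h]
      simp [hp]
  | case2 j h hp ih =>
      have hp' : (!pvPred lines[j]) = true := by simpa using hp
      rw [List.drop_eq_getElem_cons h, List.takeWhile_cons, hp']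
      simp [ih]
      omega
  | case3 j h =>
      rw [List.drop_eq_nil_of_le (by omega)]
      rfl

theorem pv_take_len_takeWhile {α : Type} (p : α → Bool) (l : List α) :
    l.take (l.takeWhile p).length = l.takeWhile p := by
  induction l with
  | nil => rfl
  | cons a l ih =>
      by_cases hp : p a <;> simp [hp, ih]

theorem pv_drop_len_takeWhile {α : Type} (p : α → Bool) (l : List α) :
    l.drop (l.takeWhile p).length = l.dropWhile p := by
  induction l with
  | nil => rfl
  | cons a l ih =>
      by_cases hp : p a <;> simp [hp, ih]

theorem pvLoopB_spec (lines : List String) (i : Nat) (games : List (List String)) :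
    pvLoopB lines i games = games ++ pvR (lines.drop i) := by
  fun_induction pvLoopB lines i games with
  | case2 i games h =>
      rw [List.drop_eq_nil_of_le (by omega), pvR_nil, List.append_nil]
  | case1 i games h j ih =>
      simp only [dite_eq_ite] at ih
      have hj : j = i + ((lines.drop i).takeWhile (fun ln => !pvPred ln)).length :=
        pvFindJ_spec lines i
      have hdec : (lines.drop i).takeWhile (fun ln => !pvPred ln) ++
          (lines.drop i).dropWhile (fun ln => !pvPred ln) = lines.drop i :=
        List.takeWhile_append_dropWhile
      have hslice : i < j →
          PySem.List.slice lines (some (i : Int)) (some (j : Int)) =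
            (lines.drop i).takeWhile (fun ln => !pvPred ln) := by
        intro _
        rw [hj]
        have hcast : ((i + ((lines.drop i).takeWhile (fun ln => !pvPred ln)).length : Nat) : Int)
            = (i : Int) + (((lines.drop i).takeWhile (fun ln => !pvPred ln)).length : Int) := by
          push_cast; ring
        rw [hcast, PySem.List.slice_natCast_add]
        exact pv_take_len_takeWhile _ _
      have hdw_drop : (lines.drop i).dropWhile (fun ln => !pvPred ln) =
          (lines.drop i).drop ((lines.drop i).takeWhile (fun ln => !pvPred ln)).length :=
        (pv_drop_len_takeWhile _ _).symm
      have hdrop1 : lines.drop (j + 1) =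
          ((lines.drop i).dropWhile (fun ln => !pvPred ln)).drop 1 := by
        rw [hdw_drop, List.drop_drop, List.drop_drop, hj]
        try congr 1
        try omega
      rw [ih]
      cases hdwc : (lines.drop i).dropWhile (fun ln => !pvPred ln) with
      | nil =>
          have htws : (lines.drop i).takeWhile (fun ln => !pvPred ln) = lines.drop i := by
            conv_rhs => rw [← hdec]
            rw [hdwc, List.append_nil]
          have hsne : lines.drop i ≠ [] := by
            have : (lines.drop i).length ≠ 0 := by
              rw [List.length_drop]; omega
            exact fun hn => this (by rw [hn]; rfl)
          have hipos : i < j := by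
            have hlen : (lines.drop i).length ≠ 0 := by rw [List.length_drop]; omega
            have hlen2 : ((lines.drop i).takeWhile (fun ln => !pvPred ln)).length
                = (lines.drop i).length := by rw [htws]
            omega
          rw [if_pos hipos, hslice hipos]
          rw [hdrop1, hdwc]
          simp only [List.drop_nil, pvR_nil, List.append_nil]
          rw [pvR_all (lines.drop i) (by
            intro x hx
            have hxx : (fun ln => !pvPred ln) x = true := by
              rw [List.dropWhile_eq_nil_iff] at hdwc
              exact hdwc x hx
            simpa using hxx)]
          have hie : (List.drop i lines).isEmpty = false := by
            simpa using hsne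
          rw [hie]
          simp [htws]
      | cons m tl =>
          have hne : (lines.drop i).dropWhile (fun ln => !pvPred ln) ≠ [] := by
            rw [hdwc]; simp
          have hm : pvPred m = true := by
            have hh := List.head_dropWhile_not (p := fun ln => !pvPred ln) (l := lines.drop i) hne
            have h1 : ((lines.drop i).dropWhile (fun ln => !pvPred ln)).head? = some m := by
              rw [hdwc]; rfl
            have h2 := List.head?_eq_some_head (l := (lines.drop i).dropWhile (fun ln => !pvPred ln)) hne
            rw [h1] at h2
            have hhead := Option.some.inj h2
            rw [← hhead] at hh
            simpa using hh
          have hsdec : lines.drop i =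
              (lines.drop i).takeWhile (fun ln => !pvPred ln) ++ m :: tl := by
            conv_lhs => rw [← hdec]
            rw [hdwc]
          have htwall : ∀ x ∈ (lines.drop i).takeWhile (fun ln => !pvPred ln),
              pvPred x = false := by
            intro x hx
            have := List.mem_takeWhile_imp hx
            simpa using this
          have hRs : pvR (lines.drop i) =
              (if ((lines.drop i).takeWhile (fun ln => !pvPred ln)).isEmpty then []
               else [(lines.drop i).takeWhile (fun ln => !pvPred ln)]) ++ pvR tl := by
            conv_lhs => rw [hsdec]
            exact pvR_split _ htwall m hm tl
          rw [hdrop1, hdwc]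
          simp only [List.drop_succ_cons, List.drop_zero]
          rw [hRs]
          by_cases hk0 : ((lines.drop i).takeWhile (fun ln => !pvPred ln)).length = 0
          · have htwe : ((lines.drop i).takeWhile (fun ln => !pvPred ln)).isEmpty = true := by
              rw [List.isEmpty_iff, ← List.length_eq_zero_iff]
              exact hk0
            have hnlt : ¬ i < j := by rw [hj, hk0]; omega
            rw [if_neg hnlt, htwe]
            simp
          · have hipos : i < j := by rw [hj]; omega
            have htwe' : (lines.drop i).takeWhile (fun ln => !pvPred ln) ≠ [] :=
              fun hn => hk0 (by rw [hn]; rfl)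
            have htwe : ((lines.drop i).takeWhile (fun ln => !pvPred ln)).isEmpty = false := by
              simpa using htwe'
            rw [if_pos hipos, hslice hipos, htwe]
            simp [List.append_assoc]

-- ===== VERDICT (by name: the statement is the Claim_ definition above) =====
theorem split_games_spec : Claim_equal_split_games := by
  intro lines _
  unfold Spec_split_games
  show split_games lines = split_games_alt lines
  have hA := pvA_loop lines [] [] (by simp)
  simp only [List.nil_append] at hA
  unfold split_games split_games_alt
  rw [hA, pvLoopB_spec]
  simp
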